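-- pv_equiv track=rewrite | github.com/ealvar3z/aoc-2024 | day17/main.py | find_min_A_for_program
-- ===== SOURCE A (Python) =====
-- def val_digit(a):
--     lo = a & 7
--     b2 = lo ^ 1
--     c = a >> b2
--     return ((lo ^ 4) ^ (c & 7)) & 7
--
-- def find_min_A_for_program(program):
--     expected = list(reversed(program))
--     last_idx = len(expected) - 1
--
--     def search(m, n, idx):
--         for a in range(m, n):
--             if val_digit(a) != expected[idx]:
--                 continue
--             if idx == last_idx:
--                 if a > 0:
--                     yield a
--             else:
--                 yield from search(a * 8, (a + 1) * 8, idx + 1)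
--
--     for candidate in search(0, 8, 0):
--         return candidate
--     return None
-- ===== SOURCE B (Python) =====
-- def val_digit(a):
--     lo = a & 7
--     b2 = lo ^ 1
--     c = a >> b2
--     return ((lo ^ 4) ^ (c & 7)) & 7
--
--
-- def find_min_A_for_program(program):
--     # Iterative level-by-level breadth-first builder instead of A's recursive
--     # depth-first generator: expand all surviving partial A values one output
--     # digit at a time, then take the minimum positive survivor.
--     candidates = [0]
--     for e in reversed(program):
--         candidates = [c * 8 + d
--                       for c in candidates
--                       for d in range(8)
--                       if val_digit(c * 8 + d) == e]
--     survivors = [a for a in candidates if a > 0]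
--     return min(survivors) if survivors else None
-- ===== Notes on version B (the rewrite author's own statement) =====
-- stated objective: alternative
-- what changed: Replaced the recursive depth-first generator (first hit returned) by an iterative breadth-first level expansion that keeps the whole list of surviving partial values per digit and returns the minimum positive survivor at the end.
import Mathlib
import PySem

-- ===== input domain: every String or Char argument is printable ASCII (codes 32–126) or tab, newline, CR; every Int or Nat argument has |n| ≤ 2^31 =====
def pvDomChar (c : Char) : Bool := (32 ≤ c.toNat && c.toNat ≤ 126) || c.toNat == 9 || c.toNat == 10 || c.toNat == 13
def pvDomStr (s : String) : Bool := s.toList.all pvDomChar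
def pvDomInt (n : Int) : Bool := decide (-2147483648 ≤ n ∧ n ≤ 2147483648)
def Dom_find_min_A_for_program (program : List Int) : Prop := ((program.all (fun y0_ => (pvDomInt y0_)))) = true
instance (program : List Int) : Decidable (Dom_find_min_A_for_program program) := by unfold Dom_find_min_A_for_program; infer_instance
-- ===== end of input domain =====

-- B replaces A's recursive depth-first generator by an iterative level-by-level
-- expansion of all surviving partial values followed by min of the positive
-- survivors (objective: alternative decomposition; same worst-case cost).

-- ===== PORT A =====
-- val_digit is only ever called on nonnegative ints (range arguments start at 0),
-- so it is ported on Nat, where Python's & ^ >> coincide with Nat's &&& ^^^ >>>.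
def valDigit (a : Nat) : Nat :=
  let lo := a &&& 7
  let b2 := lo ^^^ 1
  let c := a >>> b2
  ((lo ^^^ 4) ^^^ (c &&& 7)) &&& 7

-- The generator `search`, consumed up to its first yielded value (that is all
-- A's `for candidate in search(...): return candidate` ever demands): an
-- Option-valued search returning the first yield.  `fuel` bounds the recursion
-- depth; under Pre_ (program ≠ []) it never reaches 0 before idx = last_idx,
-- and expected.getD idx 0 is exactly expected[idx] (idx is always in range).
def searchA (expected : List Int) (lastIdx : Nat) : Nat → Nat → List Nat → Option Int
  | _, _, [] => none
  | fuel, idx, a :: rest =>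
    if (valDigit a : Int) ≠ expected.getD idx 0 then
      searchA expected lastIdx fuel idx rest
    else if idx = lastIdx then
      if 0 < a then some (a : Int) else searchA expected lastIdx fuel idx rest
    else
      match fuel with
      | 0 => none
      | fuel' + 1 =>
        match searchA expected lastIdx fuel' (idx + 1) (List.range' (a * 8) 8) with
        | some v => some v
        | none => searchA expected lastIdx (fuel' + 1) idx rest
termination_by fuel _ as => (fuel, as.length)

def find_min_A_for_program (program : List Int) : Option Int :=
  let expected := program.reverse
  let lastIdx := expected.length - 1
  searchA expected lastIdx expected.length 0 (List.range' 0 8)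

-- ===== PORT B =====
def find_min_A_for_program_alt (program : List Int) : Option Int :=
  let final := program.reverse.foldl
    (fun (cands : List Nat) (e : Int) => cands.flatMap (fun c =>
      (List.range 8).filterMap (fun d =>
        if (valDigit (c * 8 + d) : Int) = e then some (c * 8 + d) else none))) ([0] : List Nat)
  let survivors := (final.filter (fun a => 0 < a)).map (fun a => Int.ofNat a)
  PySem.List.min? survivors (fun x => x)

-- ===== PRECONDITION & SPEC =====
-- A unconditionally indexes the first element of `expected`, so it raises IndexError on the empty program.
def Pre_find_min_A_for_program (program : List Int) : Prop := program ≠ []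
instance (program : List Int) : Decidable (Pre_find_min_A_for_program program) := by
  unfold Pre_find_min_A_for_program; infer_instance
def pvWitness_find_min_A_for_program : List Int := [4]

def Spec_find_min_A_for_program (program : List Int) (out : Option Int) : Prop :=
  out = find_min_A_for_program_alt program
instance (program : List Int) (out : Option Int) : Decidable (Spec_find_min_A_for_program program out) := by
  unfold Spec_find_min_A_for_program; infer_instance

-- ===== CLAIM (what is proved, stated in full; the proofs are below) =====
def Claim_equal_find_min_A_for_program : Prop := ∀ (program : List Int), Dom_find_min_A_for_program program → Pre_find_min_A_for_program program → Spec_find_min_A_for_program program (find_min_A_for_program program)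

-- ===== LEMMAS AND PROOFS =====

-- All complete extensions of an accepted partial value c through the remaining
-- expected digits, in the (lexicographic) order both programs generate them.
def extB : List Int → Nat → List Nat
  | [], c => [c]
  | e :: es, c =>
      ((List.range' (c * 8) 8).filter (fun a => (valDigit a : Int) = e)).flatMap (extB es)

lemma flatMap_ite (l : List Nat) (p : Nat → Prop) [DecidablePred p] (f : Nat → List Nat) :
    l.flatMap (fun b => if p b then f b else []) = (l.filter (fun b => p b)).flatMap f := by
  induction l with
  | nil => rfl
  | cons a t ih =>
    simp only [List.flatMap_cons, List.filter_cons]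
    split_ifs <;> simp_all

lemma filterMap_ite_some (l : List Nat) (g : Nat → Nat) (p : Nat → Prop) [DecidablePred p] :
    l.filterMap (fun d => if p (g d) then some (g d) else none)
      = (l.filter (fun d => p (g d))).map g := by
  induction l with
  | nil => rfl
  | cons a t ih =>
    simp only [List.filterMap_cons, List.filter_cons]
    split_ifs <;> simp_all

lemma childC_eq (e : Int) (c : Nat) :
    (List.range 8).filterMap (fun d =>
        if (valDigit (c * 8 + d) : Int) = e then some (c * 8 + d) else none)
      = (List.range' (c * 8) 8).filter (fun a => (valDigit a : Int) = e) := by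
  rw [List.range'_eq_map_range, List.filter_map,
    filterMap_ite_some (List.range 8) (fun d => c * 8 + d) (fun a => (valDigit a : Int) = e)]
  rfl

lemma foldl_extB (es : List Int) (cs : List Nat) :
    es.foldl (fun (cands : List Nat) (e : Int) => cands.flatMap (fun c =>
        (List.range 8).filterMap (fun d =>
          if (valDigit (c * 8 + d) : Int) = e then some (c * 8 + d) else none))) cs
      = cs.flatMap (extB es) := by
  induction es generalizing cs with
  | nil => simp [extB]
  | cons e es ih =>
    simp only [List.foldl_cons, ih, List.flatMap_assoc]
    congr 1
    funext c
    rw [childC_eq, extB]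

lemma extB_bounds : ∀ (es : List Int) (c x : Nat), x ∈ extB es c →
    8 ^ es.length * c ≤ x ∧ x < 8 ^ es.length * (c + 1) := by
  intro es
  induction es with
  | nil =>
    intro c x hx
    simp only [extB, List.mem_singleton] at hx
    simp only [List.length_nil, pow_zero, one_mul]
    omega
  | cons e es ih =>
    intro c x hx
    simp only [extB, List.mem_flatMap, List.mem_filter, List.mem_range'] at hx
    obtain ⟨a, ⟨⟨_, ha1, ha2⟩, _⟩, hx⟩ := hx
    obtain ⟨h1, h2⟩ := ih a x hx
    have hp : (8:Nat) ^ (e :: es).length = 8 ^ es.length * 8 := by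
      simp [pow_succ]
    constructor
    · calc 8 ^ (e :: es).length * c = 8 ^ es.length * (c * 8) := by rw [hp]; ring
        _ ≤ 8 ^ es.length * a := Nat.mul_le_mul_left _ (by omega)
        _ ≤ x := h1
    · calc x < 8 ^ es.length * (a + 1) := h2
        _ ≤ 8 ^ es.length * ((c + 1) * 8) := Nat.mul_le_mul_left _ (by omega)
        _ = 8 ^ (e :: es).length * (c + 1) := by rw [hp]; ring

lemma extB_pairwise : ∀ (es : List Int) (c : Nat), (extB es c).Pairwise (· < ·) := by
  intro es
  induction es with
  | nil => intro c; simp [extB]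
  | cons e es ih =>
    intro c
    rw [extB, List.flatMap, List.pairwise_flatten]
    refine ⟨?_, ?_⟩
    · intro l hl
      simp only [List.mem_map] at hl
      obtain ⟨a, _, rfl⟩ := hl
      exact ih a
    · rw [List.pairwise_map]
      have hpw : ((List.range' (c * 8) 8).filter
          (fun a => (valDigit a : Int) = e)).Pairwise (· < ·) :=
        List.Pairwise.filter _ (List.pairwise_lt_range' 1)
      refine hpw.imp_of_mem ?_
      intro a b _ _ hab x hx y hy
      obtain ⟨_, hx2⟩ := extB_bounds es a x hx
      obtain ⟨hy1, _⟩ := extB_bounds es b y hy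
      have : 8 ^ es.length * (a + 1) ≤ 8 ^ es.length * b :=
        Nat.mul_le_mul_left _ (by omega)
      omega

lemma min?_eq_head?_of_pairwise_lt (M : List Int) (h : M.Pairwise (· < ·)) :
    PySem.List.min? M (fun x => x) = M.head? := by
  cases M with
  | nil => simp [PySem.List.min?_eq_none_iff]
  | cons x t =>
    cases hm : PySem.List.min? (x :: t) (fun x => x) with
    | none => simp [PySem.List.min?_eq_none_iff] at hm
    | some m =>
      have hmem := PySem.List.min?_mem hm
      have hmin := PySem.List.min?_isMin hm x (by simp)
      rcases List.mem_cons.mp hmem with rfl | hmt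
      · rfl
      · have := (List.pairwise_cons.mp h).1 m hmt
        omega

-- The first value A's generator yields at level idx over candidates `as`
-- is the head of the filtered, flattened extension list.
lemma searchA_eq (expected : List Int) : ∀ (es : List Int) (idx : Nat) (as : List Nat),
    expected.drop idx = es → es ≠ [] →
    searchA expected (expected.length - 1) es.length idx as =
      (((as.flatMap (fun a => if (valDigit a : Int) = expected.getD idx 0
          then extB es.tail a else [])).filter (fun x => 0 < x)).head?).map
        (fun a => Int.ofNat a) := by
  intro es
  induction es with
  | nil => intro idx as h hne; exact absurd rfl hne
  | cons e es' ih =>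
    intro idx as hdrop _
    have hlen : expected.length - idx = es'.length + 1 := by
      have := List.length_drop (l := expected) (i := idx)
      rw [hdrop] at this; simpa using this.symm
    have hgetD : expected.getD idx 0 = e := by
      have h1 : expected[idx]? = some e := by
        rw [← List.head?_drop, hdrop]; rfl
      rw [List.getD_eq_getElem?_getD, h1]; rfl
    cases es' with
    | nil =>
      -- last level: idx = last_idx
      have hlast : idx = expected.length - 1 := by
        simp only [List.length_nil] at hlen; omega
      induction as with
      | nil => simp [searchA]
      | cons a rest ihr =>
        simp only [List.length_cons, List.length_nil]
        rw [searchA]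
        by_cases hv : (valDigit a : Int) = expected.getD idx 0
        · rw [if_neg (by simpa using hv), if_pos hlast]
          by_cases ha : 0 < a
          · simp [hv, ha, extB]
          · have ha0 : a = 0 := by omega
            subst ha0
            simpa [hv, extB, List.filter_cons] using ihr
        · rw [if_pos (by simpa using hv), List.flatMap_cons, if_neg hv, List.nil_append]
          simpa only [List.length_cons, List.length_nil] using ihr
    | cons e' es'' =>
      -- intermediate level
      have hne2 : ¬ (idx = expected.length - 1) := by
        simp only [List.length_cons] at hlen; omega
      have hdrop' : expected.drop (idx + 1) = e' :: es'' := by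
        rw [← List.tail_drop, hdrop]; rfl
      have hgetD' : expected.getD (idx + 1) 0 = e' := by
        have h1 : expected[idx + 1]? = some e' := by
          rw [← List.head?_drop, hdrop']; rfl
        rw [List.getD_eq_getElem?_getD, h1]; rfl
      induction as with
      | nil => simp [searchA]
      | cons a rest ihr =>
        simp only [List.length_cons]
        rw [searchA]
        by_cases hv : (valDigit a : Int) = expected.getD idx 0
        · rw [if_neg (by simpa using hv), if_neg hne2]
          have child := ih (idx + 1) (List.range' (a * 8) 8) hdrop' (by simp)
          simp only [List.length_cons, List.tail_cons, hgetD'] at child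
          have hext : (List.range' (a * 8) 8).flatMap
              (fun b => if (valDigit b : Int) = e' then extB es'' b else [])
                = extB (e' :: es'') a := by
            rw [flatMap_ite, extB]
          rw [hext] at child
          rw [List.flatMap_cons, if_pos hv, List.tail_cons, List.filter_append,
            List.head?_append]
          cases hh : ((extB (e' :: es'') a).filter (fun x => 0 < x)).head? with
          | some v =>
            rw [hh] at child
            rw [child]
            simp
          | none =>
            rw [hh] at child
            rw [child]
            simpa using ihr
        · rw [if_pos (by simpa using hv), List.flatMap_cons, if_neg hv, List.nil_append]
          simpa only [List.length_cons] using ihr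

-- ===== VERDICT (by name: the statement is the Claim_ definition above) =====
theorem find_min_A_for_program_spec : Claim_equal_find_min_A_for_program := by
  intro program _ hpre
  unfold Spec_find_min_A_for_program
  simp only [find_min_A_for_program, find_min_A_for_program_alt]
  have hexp : program.reverse ≠ [] := by simpa using hpre
  obtain ⟨e, es, hE⟩ : ∃ e es, program.reverse = e :: es := by
    cases h : program.reverse with
    | nil => exact absurd h hexp
    | cons a b => exact ⟨a, b, rfl⟩
  have hA := searchA_eq program.reverse program.reverse 0 (List.range' 0 8) (by simp) hexp
  have hgetD0 : program.reverse.getD 0 0 = e := by rw [hE]; rfl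
  have h0 : (List.range' 0 8).flatMap (fun a =>
      if (valDigit a : Int) = program.reverse.getD 0 0
        then extB program.reverse.tail a else []) = extB program.reverse 0 := by
    rw [hgetD0]
    conv_rhs => rw [hE, extB]
    rw [flatMap_ite]
    simp [hE]
  simp only [h0] at hA
  rw [foldl_extB]
  have hBflat : (([0] : List Nat)).flatMap (extB program.reverse) = extB program.reverse 0 := by
    simp
  rw [hBflat]
  have hpw : ((extB program.reverse 0).filter (fun a => 0 < a)).Pairwise (· < ·) :=
    List.Pairwise.filter _ (extB_pairwise _ 0)
  have hpwInt : (((extB program.reverse 0).filter (fun a => 0 < a)).map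
      (fun a => Int.ofNat a)).Pairwise (· < ·) :=
    List.Pairwise.map (S := fun (x y : Int) => x < y) (f := fun a : Nat => Int.ofNat a)
      (fun _ _ h => Int.ofNat_lt.mpr h) hpw
  rw [min?_eq_head?_of_pairwise_lt _ hpwInt, List.head?_map]
  exact hA
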